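-- pv_equiv track=rewrite | github.com/carlosp/advent-of-code | 2021/03-binary-diagnostic/solve_1.py | getPowerConsumption
-- ===== SOURCE A (Python) =====
-- BIT_ZERO = '0'
--
-- BIT_ONE = '1'
--
-- def getPowerConsumption(numbers):
-- 	gammaRate, epsilonRate = '', ''
--
-- 	for position in range(len(numbers[0])):
-- 		count0s = len(list(filter(lambda number: number[position] == BIT_ZERO, numbers)))
-- 		count1s = len(list(filter(lambda number: number[position] == BIT_ONE, numbers)))
-- 		gammaRate += BIT_ONE if count1s > count0s else BIT_ZERO
-- 		epsilonRate += BIT_ONE if count1s < count0s else BIT_ZERO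
--
-- 	return int(gammaRate, 2) * int(epsilonRate, 2)
-- ===== SOURCE B (Python) =====
-- def getPowerConsumption(numbers):
-- 	length = len(numbers[0])
-- 	counts0 = [0] * length
-- 	counts1 = [0] * length
-- 	for number in numbers:
-- 		for pos in range(length):
-- 			c = number[pos]
-- 			if c == '1':
-- 				counts1[pos] += 1
-- 			elif c == '0':
-- 				counts0[pos] += 1
-- 	gammaRate, epsilonRate = 0, 0
-- 	for pos in range(length):
-- 		gammaRate = 2 * gammaRate + (1 if counts1[pos] > counts0[pos] else 0)
-- 		epsilonRate = 2 * epsilonRate + (1 if counts1[pos] < counts0[pos] else 0)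
-- 	return gammaRate * epsilonRate
-- ===== Notes on version B (the rewrite author's own statement) =====
-- stated objective: alternative
-- what changed: Instead of A's per-position pair of filter passes over the whole list and binary-string building parsed with int(_, 2), B makes a single pass over the numbers filling two per-position tally arrays and then accumulates gamma and epsilon directly as integers.
import Mathlib
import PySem

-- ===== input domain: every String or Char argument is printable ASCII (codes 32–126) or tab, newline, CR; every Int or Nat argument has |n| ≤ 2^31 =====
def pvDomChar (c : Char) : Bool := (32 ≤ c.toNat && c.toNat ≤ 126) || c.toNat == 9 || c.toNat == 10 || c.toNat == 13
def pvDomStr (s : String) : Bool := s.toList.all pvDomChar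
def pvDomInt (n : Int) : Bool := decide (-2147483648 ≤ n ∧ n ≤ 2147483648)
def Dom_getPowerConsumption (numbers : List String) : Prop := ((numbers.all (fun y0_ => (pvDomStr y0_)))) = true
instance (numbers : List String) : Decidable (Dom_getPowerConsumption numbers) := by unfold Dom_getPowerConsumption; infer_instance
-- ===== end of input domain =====

-- B replaces A's per-position double filter passes and string building by one pass of
-- per-position tallies followed by direct integer accumulation (objective: alternative decomposition).

-- ===== PORT A =====
-- hand port of int(s, 2): exact for the nonempty '0'/'1'-only strings A feeds it
-- (Python raises ValueError on the empty string; Pre_ excludes the inputs reaching that)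
def pvInt2 (cs : List Char) : Int :=
  cs.foldl (fun acc c => 2 * acc + (if c = '1' then 1 else 0)) 0

def pvStepA (numbers : List String) (p : List Char × List Char) (position : Int) :
    List Char × List Char :=
  let count0s := (numbers.filter (fun number => PySem.Str.pyGet? number position == some '0')).length
  let count1s := (numbers.filter (fun number => PySem.Str.pyGet? number position == some '1')).length
  (p.1 ++ [if count1s > count0s then '1' else '0'],
   p.2 ++ [if count1s < count0s then '1' else '0'])

def getPowerConsumption (numbers : List String) : Int :=
  -- numbers[0] raises IndexError on []; Pre_ excludes that, headD "" is the total form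
  let r := (PySem.List.pyRange 0 ((numbers.headD "").toList.length : Int) 1).foldl
    (pvStepA numbers) ([], [])
  pvInt2 r.1 * pvInt2 r.2

-- ===== PORT B =====
def pvTallyChar (number : String) (q : List Int × List Int) (pos : Nat) : List Int × List Int :=
  -- number[pos]: raises on ragged input (excluded by Pre_); ' ' is an arbitrary non-bit default
  let c := (PySem.Str.pyGet? number (pos : Int)).getD ' '
  if c = '1' then (q.1, q.2.set pos (q.2.getD pos 0 + 1))
  else if c = '0' then (q.1.set pos (q.1.getD pos 0 + 1), q.2)
  else q

def pvTally (len : Nat) (numbers : List String) : List Int × List Int :=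
  numbers.foldl (fun t number => (List.range len).foldl (pvTallyChar number) t)
    (List.replicate len 0, List.replicate len 0)

def pvRates (t : List Int × List Int) (len : Nat) : Int × Int :=
  (List.range len).foldl
    (fun p pos =>
      (2 * p.1 + (if t.1.getD pos 0 < t.2.getD pos 0 then 1 else 0),
       2 * p.2 + (if t.2.getD pos 0 < t.1.getD pos 0 then 1 else 0))) (0, 0)

def getPowerConsumption_alt (numbers : List String) : Int :=
  let len := (numbers.headD "").toList.length
  let t := pvTally len numbers
  let r := pvRates t len
  r.1 * r.2

-- ===== PRECONDITION & SPEC =====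
-- Pre_ excludes exactly the inputs on which Python A raises: the empty list (IndexError on
-- numbers[0]), an empty first string (ValueError on int('', 2)) and ragged lists where some
-- string is shorter than the first (IndexError on number[position]).
def Pre_getPowerConsumption (numbers : List String) : Prop :=
  numbers ≠ [] ∧ 0 < (numbers.headD "").toList.length ∧
    ∀ s ∈ numbers, (numbers.headD "").toList.length ≤ s.toList.length
instance (numbers : List String) : Decidable (Pre_getPowerConsumption numbers) := by
  unfold Pre_getPowerConsumption; infer_instance

def pvWitness_getPowerConsumption : List String := (["10", "01", "11"])

def Spec_getPowerConsumption (numbers : List String) (out : Int) : Prop := out = getPowerConsumption_alt numbers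
instance (numbers : List String) (out : Int) : Decidable (Spec_getPowerConsumption numbers out) := by unfold Spec_getPowerConsumption; infer_instance

-- ===== CLAIM (what is proved, stated in full; the proofs are below) =====
def Claim_equal_getPowerConsumption : Prop := ∀ (numbers : List String), Dom_getPowerConsumption numbers → Pre_getPowerConsumption numbers → Spec_getPowerConsumption numbers (getPowerConsumption numbers)

-- ===== LEMMAS AND PROOFS =====

-- the character of `n` at position `p` as both ports read it
def pvCOf (n : String) (p : Nat) : Char := (PySem.Str.pyGet? n (p : Int)).getD ' '

lemma pv_getD_set_int (l : List Int) (x p : Nat) (v : Int) :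
    (l.set x v).getD p 0 = if p = x ∧ x < l.length then v else l.getD p 0 := by
  rcases eq_or_ne p x with h1 | h1
  · subst h1
    by_cases h2 : p < l.length <;> simp [h2, List.getD_eq_getElem?_getD]
  · by_cases h2 : x < l.length <;>
      simp [h1, h1.symm, h2, List.getD_eq_getElem?_getD]

lemma pv_tallyChar_len (n : String) (il : List Nat) (a b : List Int) :
    (il.foldl (pvTallyChar n) (a, b)).1.length = a.length ∧
    (il.foldl (pvTallyChar n) (a, b)).2.length = b.length := by
  induction il generalizing a b with
  | nil => exact ⟨rfl, rfl⟩
  | cons x xs ih =>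
    simp only [List.foldl_cons, pvTallyChar]
    split_ifs with h1 h2
    · simpa using (ih a (b.set x (b.getD x 0 + 1)))
    · simpa using (ih (a.set x (a.getD x 0 + 1)) b)
    · exact ih a b

lemma pv_tallyChar_getD (n : String) (il : List Nat) (hnd : il.Nodup) (a b : List Int) :
    (∀ p, (il.foldl (pvTallyChar n) (a, b)).1.getD p 0
        = a.getD p 0 + (if p ∈ il ∧ p < a.length ∧ pvCOf n p = '0' then 1 else 0)) ∧
    (∀ p, (il.foldl (pvTallyChar n) (a, b)).2.getD p 0
        = b.getD p 0 + (if p ∈ il ∧ p < b.length ∧ pvCOf n p = '1' then 1 else 0)) := by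
  induction il generalizing a b with
  | nil => simp
  | cons x xs ih =>
    rcases List.nodup_cons.mp hnd with ⟨hx, hxs⟩
    simp only [List.foldl_cons, pvTallyChar]
    split_ifs with h1 h2
    · -- char is '1' : b updated at x
      have hc1 : pvCOf n x = '1' := h1
      have hc0 : pvCOf n x ≠ '0' := by rw [hc1]; decide
      rcases ih hxs a (b.set x (b.getD x 0 + 1)) with ⟨ih1, ih2⟩
      refine ⟨fun p => ?_, fun p => ?_⟩
      · rw [ih1 p]
        simp only [List.mem_cons]
        by_cases hpx : p = x
        · subst hpx; simp [hx, hc0]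
        · simp [hpx]
      · rw [ih2 p, pv_getD_set_int]
        simp only [List.length_set, List.mem_cons]
        by_cases hpx : p = x
        · subst hpx
          by_cases hlt : p < b.length <;> simp [hx, hlt, hc1]
        · simp [hpx]
    · -- char is '0' : a updated at x
      have hc0 : pvCOf n x = '0' := h2
      have hc1 : pvCOf n x ≠ '1' := by rw [hc0]; decide
      rcases ih hxs (a.set x (a.getD x 0 + 1)) b with ⟨ih1, ih2⟩
      refine ⟨fun p => ?_, fun p => ?_⟩
      · rw [ih1 p, pv_getD_set_int]
        simp only [List.length_set, List.mem_cons]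
        by_cases hpx : p = x
        · subst hpx
          by_cases hlt : p < a.length <;> simp [hx, hlt, hc0]
        · simp [hpx]
      · rw [ih2 p]
        simp only [List.mem_cons]
        by_cases hpx : p = x
        · subst hpx; simp [hx, hc1]
        · simp [hpx]
    · -- other char : untouched
      have hc1 : pvCOf n x ≠ '1' := h1
      have hc0 : pvCOf n x ≠ '0' := h2
      rcases ih hxs a b with ⟨ih1, ih2⟩
      refine ⟨fun p => ?_, fun p => ?_⟩
      · rw [ih1 p]
        simp only [List.mem_cons]
        by_cases hpx : p = x
        · subst hpx; simp [hx, hc0]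
        · simp [hpx]
      · rw [ih2 p]
        simp only [List.mem_cons]
        by_cases hpx : p = x
        · subst hpx; simp [hx, hc1]
        · simp [hpx]

lemma pv_outer_tally (L : Nat) (ns : List String) :
    ∀ (a b : List Int), a.length = L → b.length = L →
      ∀ p, p < L →
        (ns.foldl (fun t number => (List.range L).foldl (pvTallyChar number) t) (a, b)).1.getD p 0
          = a.getD p 0 + (ns.countP (fun n => pvCOf n p == '0') : Int) ∧
        (ns.foldl (fun t number => (List.range L).foldl (pvTallyChar number) t) (a, b)).2.getD p 0
          = b.getD p 0 + (ns.countP (fun n => pvCOf n p == '1') : Int) := by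
  induction ns with
  | nil => intro a b ha hb p hp; simp
  | cons n ns ih =>
    intro a b ha hb p hp
    have hstep : (List.range L).foldl (pvTallyChar n) (a, b)
        = (((List.range L).foldl (pvTallyChar n) (a, b)).1,
           ((List.range L).foldl (pvTallyChar n) (a, b)).2) := rfl
    set a' := ((List.range L).foldl (pvTallyChar n) (a, b)).1 with ha'
    set b' := ((List.range L).foldl (pvTallyChar n) (a, b)).2 with hb'
    have hlen := pv_tallyChar_len n (List.range L) a b
    have hget := pv_tallyChar_getD n (List.range L) (List.nodup_range) a b
    have ha'' : a'.length = L := by rw [ha', hlen.1, ha]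
    have hb'' : b'.length = L := by rw [hb', hlen.2, hb]
    have := ih a' b' ha'' hb'' p hp
    simp only [List.foldl_cons]
    rw [hstep]
    rcases this with ⟨t1, t2⟩
    constructor
    · rw [t1, hget.1 p]
      simp only [List.mem_range, hp, ha, true_and, List.countP_cons]
      by_cases hc : pvCOf n p = '0' <;> simp [hc] <;> ring
    · rw [t2, hget.2 p]
      simp only [List.mem_range, hp, hb, true_and, List.countP_cons]
      by_cases hc : pvCOf n p = '1' <;> simp [hc] <;> ring

lemma pv_tally_getD (L : Nat) (ns : List String) (p : Nat) (hp : p < L) :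
    (pvTally L ns).1.getD p 0 = (ns.countP (fun n => pvCOf n p == '0') : Int) ∧
    (pvTally L ns).2.getD p 0 = (ns.countP (fun n => pvCOf n p == '1') : Int) := by
  have := pv_outer_tally L ns (List.replicate L 0) (List.replicate L 0)
    (List.length_replicate) (List.length_replicate) p hp
  simpa [pvTally, List.getD_replicate] using this

lemma pv_cntA_eq (numbers : List String) (L : Nat)
    (hlen : ∀ n ∈ numbers, L ≤ n.toList.length) (p : Nat) (hp : p < L) (c : Char) :
    (numbers.filter (fun n => PySem.Str.pyGet? n (p : Int) == some c)).length
      = numbers.countP (fun n => pvCOf n p == c) := by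
  rw [← List.countP_eq_length_filter]
  apply List.countP_congr
  intro n hn
  have hplen : p < n.toList.length := lt_of_lt_of_le hp (hlen n hn)
  have hx : n.toList[p]? = some n.toList[p] := List.getElem?_eq_getElem hplen
  simp [pvCOf, hx]

lemma pvInt2_append (cs : List Char) (c : Char) :
    pvInt2 (cs ++ [c]) = 2 * pvInt2 cs + (if c = '1' then 1 else 0) := by
  simp [pvInt2, List.foldl_append]

lemma pv_foldAB (numbers : List String) (t : List Int × List Int) (l : List Nat)
    (h : ∀ p ∈ l,
      t.1.getD p 0 = (numbers.countP (fun n => pvCOf n p == '0') : Int) ∧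
      t.2.getD p 0 = (numbers.countP (fun n => pvCOf n p == '1') : Int) ∧
      (numbers.filter (fun n => PySem.Str.pyGet? n (p : Int) == some '0')).length
        = numbers.countP (fun n => pvCOf n p == '0') ∧
      (numbers.filter (fun n => PySem.Str.pyGet? n (p : Int) == some '1')).length
        = numbers.countP (fun n => pvCOf n p == '1')) :
    ∀ (sa : List Char × List Char) (sb : Int × Int),
      sb.1 = pvInt2 sa.1 → sb.2 = pvInt2 sa.2 →
      ((l.foldl (fun p pos =>
          (2 * p.1 + (if t.1.getD pos 0 < t.2.getD pos 0 then 1 else 0),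
           2 * p.2 + (if t.2.getD pos 0 < t.1.getD pos 0 then 1 else 0))) sb).1
        = pvInt2 ((l.foldl (fun p k => pvStepA numbers p (k : Int)) sa).1)) ∧
      ((l.foldl (fun p pos =>
          (2 * p.1 + (if t.1.getD pos 0 < t.2.getD pos 0 then 1 else 0),
           2 * p.2 + (if t.2.getD pos 0 < t.1.getD pos 0 then 1 else 0))) sb).2
        = pvInt2 ((l.foldl (fun p k => pvStepA numbers p (k : Int)) sa).2)) := by
  induction l with
  | nil => intro sa sb h1 h2; simpa using ⟨h1, h2⟩
  | cons x xs ih =>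
    intro sa sb h1 h2
    have hx := h x (List.mem_cons_self)
    rcases hx with ⟨e1, e2, e3, e4⟩
    simp only [List.foldl_cons]
    apply ih (fun p hp => h p (List.mem_cons_of_mem _ hp))
    · -- gamma component after one step
      simp only [pvStepA, pvInt2_append]
      rw [h1, e1, e2, e3, e4]
      by_cases hlt : numbers.countP (fun n => pvCOf n x == '0')
          < numbers.countP (fun n => pvCOf n x == '1')
      · simp [hlt, Int.ofNat_lt.mpr hlt]
      · have : ¬ ((numbers.countP (fun n => pvCOf n x == '0') : Int)
            < (numbers.countP (fun n => pvCOf n x == '1') : Int)) := by exact_mod_cast hlt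
        simp [hlt, this]
    · -- epsilon component after one step
      simp only [pvStepA, pvInt2_append]
      rw [h2, e1, e2, e3, e4]
      by_cases hlt : numbers.countP (fun n => pvCOf n x == '1')
          < numbers.countP (fun n => pvCOf n x == '0')
      · simp [hlt, Int.ofNat_lt.mpr hlt]
      · have : ¬ ((numbers.countP (fun n => pvCOf n x == '1') : Int)
            < (numbers.countP (fun n => pvCOf n x == '0') : Int)) := by exact_mod_cast hlt
        simp [hlt, this]

-- ===== VERDICT (by name: the statement is the Claim_ definition above) =====
theorem getPowerConsumption_spec : Claim_equal_getPowerConsumption := by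
  intro numbers _ hpre
  rcases hpre with ⟨hne, hpos, hlen⟩
  unfold Spec_getPowerConsumption getPowerConsumption getPowerConsumption_alt
  set L := (numbers.headD "").toList.length with hL
  have hrange : PySem.List.pyRange 0 (L : Int) 1 = (List.range L).map (fun k => (k : Int)) := by
    rw [PySem.List.pyRange_one]
    simp only [sub_zero, Int.toNat_natCast, zero_add]
    rw [List.map_eq_flatMap]
    simp only [List.map_id']
    rfl
  rw [hrange, List.foldl_map]
  have hmain := pv_foldAB numbers (pvTally L numbers) (List.range L)
    (by
      intro p hp
      have hp' : p < L := List.mem_range.mp hp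
      have ht := pv_tally_getD L numbers p hp'
      exact ⟨ht.1, ht.2, pv_cntA_eq numbers L hlen p hp' '0', pv_cntA_eq numbers L hlen p hp' '1'⟩)
    ([], []) (0, 0) rfl rfl
  simp only [pvRates]
  rw [hmain.1, hmain.2]
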